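-- pv_equiv track=rewrite | github.com/afrenoy/RiBoSor | ribosor/readingframes.py | frameshiftability
-- ===== SOURCE A (Python) =====
-- def frameshiftability(sequence):
--     """Measure the susceptibility for frameshifts due to runs of repeated nucleotides
--     The sequence is taken as a python string
--     """
--     n = 2
--     nbrepeats = [0 for nucl in sequence]
--     for (i, nucl) in enumerate(sequence):
--         if i == 0:
--             nbrepeats[i] = 1
--             continue
--         if (sequence[i-1] == sequence[i]):
--             nbrepeats[i] = nbrepeats[i-1]+1
--         else:
--             nbrepeats[i] = 1
--     return nbrepeats
-- ===== SOURCE B (Python) =====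
-- from itertools import groupby
--
-- def frameshiftability(sequence):
--     result = []
--     for _, group in groupby(sequence):
--         result.extend(range(1, sum(1 for _ in group) + 1))
--     return result
-- ===== Notes on version B (the rewrite author's own statement) =====
-- stated objective: idiomatic
-- what changed: B splits the sequence into maximal runs of identical characters with itertools.groupby and emits 1..L per run, instead of A's index-by-index loop looking back at sequence[i-1] and nbrepeats[i-1].
import Mathlib
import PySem

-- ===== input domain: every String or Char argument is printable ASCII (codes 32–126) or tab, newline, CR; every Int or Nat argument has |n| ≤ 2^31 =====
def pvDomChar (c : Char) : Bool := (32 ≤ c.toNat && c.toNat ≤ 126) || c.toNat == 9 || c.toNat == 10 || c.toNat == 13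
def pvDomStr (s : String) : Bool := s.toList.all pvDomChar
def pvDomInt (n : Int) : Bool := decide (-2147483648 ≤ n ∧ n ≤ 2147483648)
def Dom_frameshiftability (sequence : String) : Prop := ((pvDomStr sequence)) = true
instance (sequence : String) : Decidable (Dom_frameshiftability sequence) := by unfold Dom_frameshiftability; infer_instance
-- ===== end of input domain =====

-- B replaces A's index-by-index loop (looking back at sequence[i-1] and nbrepeats[i-1])
-- with an idiomatic groupby decomposition: split into maximal runs, emit 1..L per run.

-- ===== PORT A =====
-- A's for-loop over enumerate(sequence): iteration i writes nbrepeats[i] exactly once,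
-- in order, so the functional port appends that cell; nbrepeats[i-1] is the last cell
-- written so far (getLastD 0).
def frameshiftLoop (seq : List Char) (i : Nat) (nbrepeats : List Int) : List Int :=
  if _h : i < seq.length then
    if i == 0 then
      frameshiftLoop seq (i+1) (nbrepeats ++ [1])
    else if seq[i-1]! == seq[i]! then
      frameshiftLoop seq (i+1) (nbrepeats ++ [nbrepeats.getLastD 0 + 1])
    else
      frameshiftLoop seq (i+1) (nbrepeats ++ [1])
  else nbrepeats
termination_by seq.length - i

def frameshiftability (sequence : String) : List Int :=
  frameshiftLoop sequence.toList 0 []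

-- ===== PORT B =====
-- itertools.groupby on a string: the maximal runs of identical characters, in order.
def pyGroupBy (cs : List Char) : List (List Char) :=
  match cs with
  | [] => []
  | c :: rest =>
    (c :: rest.takeWhile (fun x => x == c)) :: pyGroupBy (rest.dropWhile (fun x => x == c))
termination_by cs.length
decreasing_by
  simpa using Nat.lt_succ_of_le (List.length_dropWhile_le (fun x => x == c) rest)

def frameshiftability_alt (sequence : String) : List Int :=
  (pyGroupBy sequence.toList).foldl
    (fun result g => result ++ PySem.List.pyRange 1 ((g.length : Int) + 1) 1) []

-- ===== PRECONDITION & SPEC =====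
def Spec_frameshiftability (sequence : String) (out : List Int) : Prop := out = frameshiftability_alt sequence
instance (sequence : String) (out : List Int) : Decidable (Spec_frameshiftability sequence out) := by unfold Spec_frameshiftability; infer_instance

-- ===== CLAIM (what is proved, stated in full; the proofs are below) =====
def Claim_equal_frameshiftability : Prop := ∀ (sequence : String), Dom_frameshiftability sequence → Spec_frameshiftability sequence (frameshiftability sequence)

-- ===== LEMMAS AND PROOFS =====

-- Canonical run-length array both ports are proved equal to.
def rleAux (p : Char) (k : Int) : List Char → List Int
  | [] => []
  | c :: cs =>
    (if c == p then k + 1 else 1) :: rleAux c (if c == p then k + 1 else 1) cs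

def rle : List Char → List Int
  | [] => []
  | c :: cs => 1 :: rleAux c 1 cs

lemma range_map_shift (n : Nat) (a : Int) :
    (List.range (n+1)).map (fun j : Nat => a + (j : Int)) =
      a :: (List.range n).map (fun j : Nat => a + 1 + (j : Int)) := by
  rw [List.range_succ_eq_map, List.map_cons, List.map_map]
  congr 1
  · norm_num
  · apply List.map_congr_left
    intro j _
    simp [Function.comp, Nat.succ_eq_add_one]
    ring

-- ---- B side ----

lemma head?_dropWhile (p : Char → Bool) (l : List Char) (x : Char)
    (h : (l.dropWhile p).head? = some x) : p x = false := by
  induction l with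
  | nil => simp at h
  | cons a l ih =>
    by_cases hp : p a = true
    · rw [List.dropWhile_cons_of_pos hp] at h; exact ih h
    · rw [List.dropWhile_cons_of_neg hp] at h
      simp at h; subst h; simpa using hp

lemma rleAux_run (c : Char) (rest : List Char)
    (hr : ∀ d, rest.head? = some d → (d == c) = false) :
    ∀ (g : List Char), (∀ x ∈ g, x = c) → ∀ k : Int,
      rleAux c k (g ++ rest) =
        (List.range g.length).map (fun j : Nat => k + 1 + (j : Int)) ++ rle rest := by
  intro g
  induction g with
  | nil =>
    intro _ k
    cases rest with
    | nil => simp [rleAux, rle]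
    | cons d ds =>
      have hd : (d == c) = false := hr d rfl
      simp [rleAux, rle, hd]
  | cons x g' ih =>
    intro hg k
    have hx : x = c := hg x (by simp)
    subst hx
    have hstep : rleAux x k ((x :: g') ++ rest) = (k+1) :: rleAux x (k+1) (g' ++ rest) := by
      simp [rleAux]
    rw [hstep, ih (fun y hy => hg y (by simp [hy])) (k+1)]
    rw [List.length_cons, range_map_shift g'.length (k+1)]
    simp

lemma pyGroupBy_flatMap_eq_rle (cs : List Char) :
    (pyGroupBy cs).flatMap (fun g => PySem.List.pyRange 1 ((g.length : Int) + 1) 1) = rle cs := by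
  induction cs using pyGroupBy.induct with
  | case1 => simp [pyGroupBy, rle]
  | case2 c rest ih =>
    rw [pyGroupBy, List.flatMap_cons, ih]
    have hsplit : rest = rest.takeWhile (fun x => x == c) ++ rest.dropWhile (fun x => x == c) :=
      (List.takeWhile_append_dropWhile).symm
    have hrle : rle (c :: rest) = 1 :: rleAux c 1 rest := rfl
    have hrun := rleAux_run c (rest.dropWhile (fun x => x == c))
      (fun d hd => head?_dropWhile _ rest d hd)
      (rest.takeWhile (fun x => x == c))
      (fun y hy => eq_of_beq (List.mem_takeWhile_imp (p := fun x => x == c) hy)) 1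
    rw [hrle]
    conv_rhs => rw [hsplit]
    rw [hrun, PySem.List.pyRange_one]
    have hlen : (((c :: rest.takeWhile (fun x => x == c)).length : Int) + 1 - 1).toNat =
        (rest.takeWhile (fun x => x == c)).length + 1 := by simp
    rw [hlen, range_map_shift _ 1]
    simp

lemma alt_eq_rle (cs : List Char) :
    (pyGroupBy cs).foldl
      (fun result g => result ++ PySem.List.pyRange 1 ((g.length : Int) + 1) 1) [] = rle cs := by
  rw [PySem.List.foldl_append_eq_flatMap]
  simpa using pyGroupBy_flatMap_eq_rle cs

-- ---- A side ----

lemma rleAux_snoc (xs : List Char) (p c : Char) (k : Int) :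
    rleAux p k (xs ++ [c]) =
      rleAux p k xs ++ [if xs.getLastD p == c then (rleAux p k xs).getLastD k + 1 else 1] := by
  induction xs generalizing p k with
  | nil =>
    have hcomm : (c == p) = (p == c) := by
      by_cases h : p = c
      · simp [h]
      · have h' : ¬ c = p := fun hc => h hc.symm
        simp [h, h']
    simp [rleAux, hcomm]
  | cons x xs' ih =>
    simp only [List.cons_append, rleAux, List.getLastD_cons]
    rw [ih]

lemma rle_snoc_cons (x : Char) (xs' : List Char) (c : Char) :
    rle ((x :: xs') ++ [c]) =
      rle (x :: xs') ++ [if xs'.getLastD x == c then (rle (x :: xs')).getLastD 0 + 1 else 1] := by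
  simp only [List.cons_append, rle, rleAux_snoc, List.getLastD_cons]

lemma take_getLastD (seq : List Char) (i : Nat) (h0 : 0 < i) (h : i ≤ seq.length) (d : Char) :
    (seq.take i).getLastD d = seq[i-1]'(by omega) := by
  have hlen : (seq.take i).length = i := by simp [Nat.min_eq_left h]
  rw [List.getLastD_eq_getLast?, List.getLast?_eq_getElem?, hlen, List.getElem?_take]
  rw [if_pos (by omega : i - 1 < i), List.getElem?_eq_getElem (by omega)]
  rfl

lemma loopA_inv (seq : List Char) : ∀ n i, seq.length - i = n → i ≤ seq.length →
    frameshiftLoop seq i (rle (seq.take i)) = rle seq := by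
  intro n
  induction n with
  | zero =>
    intro i hn hi
    have hie : i = seq.length := by omega
    subst hie
    rw [frameshiftLoop, dif_neg (by omega)]
    rw [List.take_length]
  | succ m ih =>
    intro i hn hi
    have hlt : i < seq.length := by omega
    have htake : seq.take (i+1) = seq.take i ++ [seq[i]] := by
      rw [List.take_add_one, List.getElem?_eq_getElem hlt]; rfl
    rw [frameshiftLoop, dif_pos hlt]
    by_cases hi0 : i = 0
    · subst hi0
      have h00 : ((0 : Nat) == 0) = true := rfl
      rw [if_pos h00]
      have h1 : rle (seq.take 1) = [1] := by
        rw [htake]; simp [rle, rleAux]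
      have hrec := ih 1 (by omega) (by omega)
      rw [h1] at hrec
      simpa using hrec
    · rw [if_neg (by simpa using hi0)]
      obtain ⟨x, xs', hcons⟩ : ∃ x xs', seq.take i = x :: xs' := by
        cases hc : seq.take i with
        | nil =>
          exfalso
          have hl : (seq.take i).length = i := by simp [Nat.min_eq_left (le_of_lt hlt)]
          rw [hc] at hl; simp at hl; omega
        | cons a l => exact ⟨a, l, rfl⟩
      have hlast : xs'.getLastD x = seq[i-1]'(by omega) := by
        have h := take_getLastD seq i (by omega) (le_of_lt hlt) x
        rw [hcons, List.getLastD_cons] at h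
        exact h
      have hprev : seq[i-1]! = seq[i-1]'(by omega) := getElem!_pos seq (i-1) (by omega)
      have hcur : seq[i]! = seq[i]'hlt := getElem!_pos seq i hlt
      have hsnoc : rle (seq.take (i+1)) =
          rle (seq.take i) ++
            [if xs'.getLastD x == seq[i] then (rle (seq.take i)).getLastD 0 + 1 else 1] := by
        rw [htake, hcons, rle_snoc_cons, ← hcons]
      have ihnext := ih (i+1) (by omega) (by omega)
      rw [hprev, hcur]
      by_cases heq : seq[i-1]'(by omega) = seq[i]'hlt
      · rw [if_pos (beq_iff_eq.mpr heq), ← ihnext, hsnoc,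
          if_pos (by rw [hlast]; exact beq_iff_eq.mpr heq)]
      · rw [if_neg (by simp [heq]), ← ihnext, hsnoc,
          if_neg (by rw [hlast]; simp [heq])]

lemma a_eq_rle (cs : List Char) : frameshiftLoop cs 0 [] = rle cs := by
  have h := loopA_inv cs (cs.length - 0) 0 rfl (by omega)
  simpa using h

-- ===== VERDICT (by name: the statement is the Claim_ definition above) =====
theorem frameshiftability_spec : Claim_equal_frameshiftability := by
  intro sequence _
  unfold Spec_frameshiftability frameshiftability frameshiftability_alt
  rw [a_eq_rle, alt_eq_rle]
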